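-- pv_equiv track=rewrite | github.com/jinsoo96/codingtest | 프로그래머스/unrated/120848. 팩토리얼/팩토리얼.py | solution
-- ===== SOURCE A (Python) =====
-- def solution(n):
--     answer = 1
--     f = 1
--     while f <= n:
--         answer +=1
--         f *=answer
--     answer -=1
--
--
--
--     return answer
-- ===== SOURCE B (Python) =====
-- # All factorials 1!..12!; 13! = 6227020800 already exceeds the 2^31 input bound.
-- _FACTS = [1, 2, 6, 24, 120, 720, 5040, 40320, 362880, 3628800, 39916800, 479001600]
--
-- def solution(n):
--     return sum(1 for f in _FACTS if f <= n)
-- ===== Notes on version B (the rewrite author's own statement) =====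
-- stated objective: simpler
-- what changed: B replaces A's multiply-and-compare while loop by a single scan of a precomputed table of the 12 factorials that fit in the 2^31 input domain, counting those <= n.
import Mathlib
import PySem

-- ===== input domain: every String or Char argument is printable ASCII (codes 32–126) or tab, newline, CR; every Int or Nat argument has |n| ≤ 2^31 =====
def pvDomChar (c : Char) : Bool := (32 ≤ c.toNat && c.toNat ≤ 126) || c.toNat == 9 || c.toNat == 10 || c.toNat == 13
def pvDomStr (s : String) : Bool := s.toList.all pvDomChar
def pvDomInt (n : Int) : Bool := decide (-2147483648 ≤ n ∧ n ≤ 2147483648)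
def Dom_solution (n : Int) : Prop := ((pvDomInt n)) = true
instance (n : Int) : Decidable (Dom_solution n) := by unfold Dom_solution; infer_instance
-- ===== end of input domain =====

-- B replaces A's multiply-up while loop by a count over the precomputed table of the
-- factorials that fit in the stated 2^31 input domain (equal on Dom; simpler, no loop state).
-- ===== PORT A =====
-- Python A's while loop: state (answer, f); fuel only makes the recursion total
-- (on Dom, n ≤ 2^31 < 13!, so at most 13 iterations run; 15 is ample).
def solutionLoopA (fuel : Nat) (n answer f : Int) : Int :=
  match fuel with
  | 0 => answer
  | fuel + 1 => if f ≤ n then solutionLoopA fuel n (answer + 1) (f * (answer + 1)) else answer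

def solution (n : Int) : Int := solutionLoopA 15 n 1 1 - 1

-- ===== PORT B =====
-- the module constant _FACTS
def pvFacts : List Int :=
  [1, 2, 6, 24, 120, 720, 5040, 40320, 362880, 3628800, 39916800, 479001600]

-- sum(1 for f in _FACTS if f <= n)
def solution_alt (n : Int) : Int :=
  pvFacts.foldl (fun acc f => if f ≤ n then acc + 1 else acc) 0

-- ===== PRECONDITION & SPEC =====
def Spec_solution (n : Int) (out : Int) : Prop := out = solution_alt n
instance (n : Int) (out : Int) : Decidable (Spec_solution n out) := by unfold Spec_solution; infer_instance

-- ===== CLAIM (what is proved, stated in full; the proofs are below) =====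
def Claim_equal_solution : Prop := ∀ (n : Int), Dom_solution n → Spec_solution n (solution n)

-- ===== LEMMAS AND PROOFS =====

-- ===== VERDICT (by name: the statement is the Claim_ definition above) =====
theorem solution_spec : Claim_equal_solution := by
  intro n hd
  have hn : n ≤ 2147483648 := by
    simp only [Dom_solution, pvDomInt, decide_eq_true_eq] at hd
    exact hd.2
  unfold Spec_solution solution solution_alt
  simp only [solutionLoopA, pvFacts, List.foldl]
  norm_num
  by_cases h0 : (1:Int) ≤ n
  · -- 1 ≤ n
    by_cases h1 : (2:Int) ≤ n
    · -- 2 ≤ n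
      by_cases h2 : (6:Int) ≤ n
      · -- 6 ≤ n
        by_cases h3 : (24:Int) ≤ n
        · -- 24 ≤ n
          by_cases h4 : (120:Int) ≤ n
          · -- 120 ≤ n
            by_cases h5 : (720:Int) ≤ n
            · -- 720 ≤ n
              by_cases h6 : (5040:Int) ≤ n
              · -- 5040 ≤ n
                by_cases h7 : (40320:Int) ≤ n
                · -- 40320 ≤ n
                  by_cases h8 : (362880:Int) ≤ n
                  · -- 362880 ≤ n
                    by_cases h9 : (3628800:Int) ≤ n
                    · -- 3628800 ≤ n
                      by_cases h10 : (39916800:Int) ≤ n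
                      · -- 39916800 ≤ n
                        by_cases h11 : (479001600:Int) ≤ n
                        · -- 479001600 ≤ n
                          simp only [if_pos (show (1:Int) ≤ n by omega), if_pos (show (2:Int) ≤ n by omega), if_pos (show (6:Int) ≤ n by omega), if_pos (show (24:Int) ≤ n by omega), if_pos (show (120:Int) ≤ n by omega), if_pos (show (720:Int) ≤ n by omega), if_pos (show (5040:Int) ≤ n by omega), if_pos (show (40320:Int) ≤ n by omega), if_pos (show (362880:Int) ≤ n by omega), if_pos (show (3628800:Int) ≤ n by omega), if_pos (show (39916800:Int) ≤ n by omega), if_pos (show (479001600:Int) ≤ n by omega), if_neg (show ¬((6227020800:Int) ≤ n) by omega)]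
                          norm_num
                        · -- n < 479001600
                          simp only [if_pos (show (1:Int) ≤ n by omega), if_pos (show (2:Int) ≤ n by omega), if_pos (show (6:Int) ≤ n by omega), if_pos (show (24:Int) ≤ n by omega), if_pos (show (120:Int) ≤ n by omega), if_pos (show (720:Int) ≤ n by omega), if_pos (show (5040:Int) ≤ n by omega), if_pos (show (40320:Int) ≤ n by omega), if_pos (show (362880:Int) ≤ n by omega), if_pos (show (3628800:Int) ≤ n by omega), if_pos (show (39916800:Int) ≤ n by omega), if_neg (show ¬((479001600:Int) ≤ n) by omega)]
                          norm_num
                      · -- n < 39916800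
                        simp only [if_pos (show (1:Int) ≤ n by omega), if_pos (show (2:Int) ≤ n by omega), if_pos (show (6:Int) ≤ n by omega), if_pos (show (24:Int) ≤ n by omega), if_pos (show (120:Int) ≤ n by omega), if_pos (show (720:Int) ≤ n by omega), if_pos (show (5040:Int) ≤ n by omega), if_pos (show (40320:Int) ≤ n by omega), if_pos (show (362880:Int) ≤ n by omega), if_pos (show (3628800:Int) ≤ n by omega), if_neg (show ¬((39916800:Int) ≤ n) by omega), if_neg (show ¬((479001600:Int) ≤ n) by omega)]
                        norm_num
                    · -- n < 3628800
                      simp only [if_pos (show (1:Int) ≤ n by omega), if_pos (show (2:Int) ≤ n by omega), if_pos (show (6:Int) ≤ n by omega), if_pos (show (24:Int) ≤ n by omega), if_pos (show (120:Int) ≤ n by omega), if_pos (show (720:Int) ≤ n by omega), if_pos (show (5040:Int) ≤ n by omega), if_pos (show (40320:Int) ≤ n by omega), if_pos (show (362880:Int) ≤ n by omega), if_neg (show ¬((3628800:Int) ≤ n) by omega), if_neg (show ¬((39916800:Int) ≤ n) by omega), if_neg (show ¬((479001600:Int) ≤ n) by omega)]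
                      norm_num
                  · -- n < 362880
                    simp only [if_pos (show (1:Int) ≤ n by omega), if_pos (show (2:Int) ≤ n by omega), if_pos (show (6:Int) ≤ n by omega), if_pos (show (24:Int) ≤ n by omega), if_pos (show (120:Int) ≤ n by omega), if_pos (show (720:Int) ≤ n by omega), if_pos (show (5040:Int) ≤ n by omega), if_pos (show (40320:Int) ≤ n by omega), if_neg (show ¬((362880:Int) ≤ n) by omega), if_neg (show ¬((3628800:Int) ≤ n) by omega), if_neg (show ¬((39916800:Int) ≤ n) by omega), if_neg (show ¬((479001600:Int) ≤ n) by omega)]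
                    norm_num
                · -- n < 40320
                  simp only [if_pos (show (1:Int) ≤ n by omega), if_pos (show (2:Int) ≤ n by omega), if_pos (show (6:Int) ≤ n by omega), if_pos (show (24:Int) ≤ n by omega), if_pos (show (120:Int) ≤ n by omega), if_pos (show (720:Int) ≤ n by omega), if_pos (show (5040:Int) ≤ n by omega), if_neg (show ¬((40320:Int) ≤ n) by omega), if_neg (show ¬((362880:Int) ≤ n) by omega), if_neg (show ¬((3628800:Int) ≤ n) by omega), if_neg (show ¬((39916800:Int) ≤ n) by omega), if_neg (show ¬((479001600:Int) ≤ n) by omega)]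
                  norm_num
              · -- n < 5040
                simp only [if_pos (show (1:Int) ≤ n by omega), if_pos (show (2:Int) ≤ n by omega), if_pos (show (6:Int) ≤ n by omega), if_pos (show (24:Int) ≤ n by omega), if_pos (show (120:Int) ≤ n by omega), if_pos (show (720:Int) ≤ n by omega), if_neg (show ¬((5040:Int) ≤ n) by omega), if_neg (show ¬((40320:Int) ≤ n) by omega), if_neg (show ¬((362880:Int) ≤ n) by omega), if_neg (show ¬((3628800:Int) ≤ n) by omega), if_neg (show ¬((39916800:Int) ≤ n) by omega), if_neg (show ¬((479001600:Int) ≤ n) by omega)]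
                norm_num
            · -- n < 720
              simp only [if_pos (show (1:Int) ≤ n by omega), if_pos (show (2:Int) ≤ n by omega), if_pos (show (6:Int) ≤ n by omega), if_pos (show (24:Int) ≤ n by omega), if_pos (show (120:Int) ≤ n by omega), if_neg (show ¬((720:Int) ≤ n) by omega), if_neg (show ¬((5040:Int) ≤ n) by omega), if_neg (show ¬((40320:Int) ≤ n) by omega), if_neg (show ¬((362880:Int) ≤ n) by omega), if_neg (show ¬((3628800:Int) ≤ n) by omega), if_neg (show ¬((39916800:Int) ≤ n) by omega), if_neg (show ¬((479001600:Int) ≤ n) by omega)]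
              norm_num
          · -- n < 120
            simp only [if_pos (show (1:Int) ≤ n by omega), if_pos (show (2:Int) ≤ n by omega), if_pos (show (6:Int) ≤ n by omega), if_pos (show (24:Int) ≤ n by omega), if_neg (show ¬((120:Int) ≤ n) by omega), if_neg (show ¬((720:Int) ≤ n) by omega), if_neg (show ¬((5040:Int) ≤ n) by omega), if_neg (show ¬((40320:Int) ≤ n) by omega), if_neg (show ¬((362880:Int) ≤ n) by omega), if_neg (show ¬((3628800:Int) ≤ n) by omega), if_neg (show ¬((39916800:Int) ≤ n) by omega), if_neg (show ¬((479001600:Int) ≤ n) by omega)]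
            norm_num
        · -- n < 24
          simp only [if_pos (show (1:Int) ≤ n by omega), if_pos (show (2:Int) ≤ n by omega), if_pos (show (6:Int) ≤ n by omega), if_neg (show ¬((24:Int) ≤ n) by omega), if_neg (show ¬((120:Int) ≤ n) by omega), if_neg (show ¬((720:Int) ≤ n) by omega), if_neg (show ¬((5040:Int) ≤ n) by omega), if_neg (show ¬((40320:Int) ≤ n) by omega), if_neg (show ¬((362880:Int) ≤ n) by omega), if_neg (show ¬((3628800:Int) ≤ n) by omega), if_neg (show ¬((39916800:Int) ≤ n) by omega), if_neg (show ¬((479001600:Int) ≤ n) by omega)]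
          norm_num
      · -- n < 6
        simp only [if_pos (show (1:Int) ≤ n by omega), if_pos (show (2:Int) ≤ n by omega), if_neg (show ¬((6:Int) ≤ n) by omega), if_neg (show ¬((24:Int) ≤ n) by omega), if_neg (show ¬((120:Int) ≤ n) by omega), if_neg (show ¬((720:Int) ≤ n) by omega), if_neg (show ¬((5040:Int) ≤ n) by omega), if_neg (show ¬((40320:Int) ≤ n) by omega), if_neg (show ¬((362880:Int) ≤ n) by omega), if_neg (show ¬((3628800:Int) ≤ n) by omega), if_neg (show ¬((39916800:Int) ≤ n) by omega), if_neg (show ¬((479001600:Int) ≤ n) by omega)]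
        norm_num
    · -- n < 2
      simp only [if_pos (show (1:Int) ≤ n by omega), if_neg (show ¬((2:Int) ≤ n) by omega), if_neg (show ¬((6:Int) ≤ n) by omega), if_neg (show ¬((24:Int) ≤ n) by omega), if_neg (show ¬((120:Int) ≤ n) by omega), if_neg (show ¬((720:Int) ≤ n) by omega), if_neg (show ¬((5040:Int) ≤ n) by omega), if_neg (show ¬((40320:Int) ≤ n) by omega), if_neg (show ¬((362880:Int) ≤ n) by omega), if_neg (show ¬((3628800:Int) ≤ n) by omega), if_neg (show ¬((39916800:Int) ≤ n) by omega), if_neg (show ¬((479001600:Int) ≤ n) by omega)]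
      norm_num
  · -- n < 1
    simp only [if_neg (show ¬((1:Int) ≤ n) by omega), if_neg (show ¬((2:Int) ≤ n) by omega), if_neg (show ¬((6:Int) ≤ n) by omega), if_neg (show ¬((24:Int) ≤ n) by omega), if_neg (show ¬((120:Int) ≤ n) by omega), if_neg (show ¬((720:Int) ≤ n) by omega), if_neg (show ¬((5040:Int) ≤ n) by omega), if_neg (show ¬((40320:Int) ≤ n) by omega), if_neg (show ¬((362880:Int) ≤ n) by omega), if_neg (show ¬((3628800:Int) ≤ n) by omega), if_neg (show ¬((39916800:Int) ≤ n) by omega), if_neg (show ¬((479001600:Int) ≤ n) by omega)]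
    norm_num
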